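-- pv_equiv track=rewrite | github.com/bonicim/technical_interviews_exposed | src/algorithms/pramp_questions/busiest_time_in_mall.py | solution_elegant
-- ===== SOURCE A (Python) =====
-- def solution_elegant(data):
--     curr_count = 0
--     busiest = curr_count
--     busiest_time = 0
--
--     for index, data_point in enumerate(data):
--         timestamp, count, entry = data_point
--
--         if entry == 1:
--             curr_count += count
--         elif entry == 0:
--             curr_count -= count
--
--         if index < len(data) - 1 and timestamp == data[index + 1][0]:
--             continue
--
--         # we have a change in time, update the count
--         if curr_count > busiest:
--             busiest = curr_count
--             busiest_time = timestamp
--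
--     return busiest_time
-- ===== SOURCE B (Python) =====
-- def solution_elegant(data):
--     # pass 1: collapse runs of consecutive equal timestamps into (timestamp, net delta) groups
--     groups = []
--     cur_ts = None
--     cur_d = 0
--     for ts, count, entry in data:
--         d = count if entry == 1 else (-count if entry == 0 else 0)
--         if cur_ts is not None and ts == cur_ts:
--             cur_d += d
--         else:
--             if cur_ts is not None:
--                 groups.append((cur_ts, cur_d))
--             cur_ts, cur_d = ts, d
--     if cur_ts is not None:
--         groups.append((cur_ts, cur_d))
--     # pass 2: running cumulative total over the groups, strict '>' keeps the earliest maximum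
--     best = 0
--     best_time = 0
--     total = 0
--     for ts, d in groups:
--         total += d
--         if total > best:
--             best = total
--             best_time = ts
--     return best_time
-- ===== Notes on version B (the rewrite author's own statement) =====
-- stated objective: alternative
-- what changed: Replaces A's single sweep with an enumerate index and a data[index+1] peek-ahead by two separate passes: first collapse runs of consecutive equal timestamps into (timestamp, net delta) groups, then scan the groups with a running cumulative total updating the strict-maximum best/best_time.
import Mathlib
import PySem

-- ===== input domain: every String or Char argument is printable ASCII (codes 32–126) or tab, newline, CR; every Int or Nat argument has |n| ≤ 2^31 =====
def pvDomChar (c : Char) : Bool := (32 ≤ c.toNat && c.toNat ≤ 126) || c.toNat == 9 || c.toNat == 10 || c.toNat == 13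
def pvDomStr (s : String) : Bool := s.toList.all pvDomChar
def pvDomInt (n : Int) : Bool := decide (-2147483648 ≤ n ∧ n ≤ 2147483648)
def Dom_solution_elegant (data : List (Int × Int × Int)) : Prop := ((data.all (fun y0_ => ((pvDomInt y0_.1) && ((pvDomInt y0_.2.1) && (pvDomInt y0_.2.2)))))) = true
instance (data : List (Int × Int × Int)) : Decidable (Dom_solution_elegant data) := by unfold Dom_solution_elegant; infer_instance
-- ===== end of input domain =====

-- B replaces A's peek-ahead single sweep by two plain passes (collapse consecutive
-- equal timestamps into net deltas, then scan a running total); alternative, same cost.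

-- ===== PORT A =====
-- A's for-loop with its 'index < len(data)-1 and timestamp == data[index+1][0]' lookahead:
-- structural recursion on the list; the lookahead is the head of the remaining list, so the
-- one-element case (last index) is the same body with the lookahead test false.
def aLoop : List (Int × Int × Int) → Int → Int → Int → Int
  | [], _, _, busiest_time => busiest_time
  | (timestamp, count, entry) :: [], curr_count, busiest, busiest_time =>
    let curr' := if entry = 1 then curr_count + count
                 else if entry = 0 then curr_count - count
                 else curr_count
    -- last iteration: the final update happens, then the loop ends and busiest_time is returned
    if curr' > busiest then timestamp else busiest_time
  | (timestamp, count, entry) :: (ts2, c2, e2) :: rest, curr_count, busiest, busiest_time =>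
    let curr' := if entry = 1 then curr_count + count
                 else if entry = 0 then curr_count - count
                 else curr_count
    if timestamp = ts2 then aLoop ((ts2, c2, e2) :: rest) curr' busiest busiest_time  -- continue
    else if curr' > busiest then aLoop ((ts2, c2, e2) :: rest) curr' curr' timestamp
    else aLoop ((ts2, c2, e2) :: rest) curr' busiest busiest_time

def solution_elegant (data : List (Int × Int × Int)) : Int :=
  aLoop data 0 0 0

-- ===== PORT B =====
-- Source B pass 1: groups list (appended at the end), cur_ts : Option for 'cur_ts is None'.
def altGroups : List (Int × Int × Int) → List (Int × Int) → Option (Int × Int) → List (Int × Int)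
  | [], gs, none => gs
  | [], gs, some g => gs ++ [g]
  | (ts, count, entry) :: rest, gs, cur =>
    let d := if entry = 1 then count else if entry = 0 then -count else 0
    match cur with
    | some (cts, cd) =>
      if ts = cts then altGroups rest gs (some (cts, cd + d))
      else altGroups rest (gs ++ [(cts, cd)]) (some (ts, d))
    | none => altGroups rest gs (some (ts, d))

-- Source B pass 2: running total with best/best_time accumulators.
def altScan : List (Int × Int) → Int → Int → Int → Int
  | [], _, best_time, _ => best_time
  | (ts, d) :: rest, best, best_time, total =>
    let total' := total + d
    if total' > best then altScan rest total' ts total'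
    else altScan rest best best_time total'

def solution_elegant_alt (data : List (Int × Int × Int)) : Int :=
  altScan (altGroups data [] none) 0 0 0

-- ===== PRECONDITION & SPEC =====
def Spec_solution_elegant (data : List (Int × Int × Int)) (out : Int) : Prop := out = solution_elegant_alt data
instance (data : List (Int × Int × Int)) (out : Int) : Decidable (Spec_solution_elegant data out) := by unfold Spec_solution_elegant; infer_instance

-- ===== CLAIM (what is proved, stated in full; the proofs are below) =====
def Claim_equal_solution_elegant : Prop := ∀ (data : List (Int × Int × Int)), Dom_solution_elegant data → Spec_solution_elegant data (solution_elegant data)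

-- ===== LEMMAS AND PROOFS =====

-- the groups accumulator only collects finished groups at the end
theorem altGroups_acc (l : List (Int × Int × Int)) (gs : List (Int × Int))
    (cur : Option (Int × Int)) : altGroups l gs cur = gs ++ altGroups l [] cur := by
  induction l generalizing gs cur with
  | nil => cases cur <;> simp [altGroups]
  | cons x rest ih =>
    obtain ⟨ts, count, entry⟩ := x
    cases cur with
    | none => simp only [altGroups]; rw [ih]
    | some g =>
      obtain ⟨cts, cd⟩ := g
      simp only [altGroups]
      by_cases h : ts = cts
      · rw [if_pos h, if_pos h, ih]
      · rw [if_neg h, if_neg h, ih, ih ([] ++ [(cts, cd)])]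
        simp

-- flushing a pending group whose run has ended: it becomes the next output group
theorem altGroups_flush (l : List (Int × Int × Int)) (cts cd : Int)
    (h : ∀ ts2 c2 e2 r, l = (ts2, c2, e2) :: r → ts2 ≠ cts) :
    altGroups l [] (some (cts, cd)) = (cts, cd) :: altGroups l [] none := by
  cases l with
  | nil => simp [altGroups]
  | cons x r =>
    obtain ⟨ts2, c2, e2⟩ := x
    have hne : ts2 ≠ cts := h ts2 c2 e2 r rfl
    simp only [altGroups]
    rw [if_neg hne, altGroups_acc]
    simp

-- main invariant: A's sweep equals B's scan over B's groups, both from a fresh state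
-- (first conjunct) and resumed mid-run with a pending group (cts, cd) (second conjunct).
theorem main_inv (l : List (Int × Int × Int)) :
    (∀ tot b bt, aLoop l tot b bt = altScan (altGroups l [] none) b bt tot) ∧
    (∀ cts cd tot b bt, (l.head?.map (·.1)) = some cts →
       aLoop l (tot + cd) b bt = altScan (altGroups l [] (some (cts, cd))) b bt tot) := by
  induction l with
  | nil =>
    constructor
    · intro tot b bt; simp [aLoop, altGroups, altScan]
    · intro cts cd tot b bt h; simp at h
  | cons x rest ih =>
    obtain ⟨ts, count, entry⟩ := x
    have key : ∀ cd tot b bt,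
        aLoop ((ts, count, entry) :: rest) (tot + cd) b bt =
        altScan (altGroups rest [] (some (ts, cd +
          (if entry = 1 then count else if entry = 0 then -count else 0)))) b bt tot := by
      intro cd tot b bt
      have hcurr : (if entry = 1 then tot + cd + count
                    else if entry = 0 then tot + cd - count else tot + cd)
                 = tot + (cd + (if entry = 1 then count else if entry = 0 then -count else 0)) := by
        split_ifs <;> ring
      cases rest with
      | nil =>
        simp only [aLoop, hcurr]
        rw [altGroups_flush _ _ _ (fun _ _ _ _ h _ => by cases h)]
        simp only [altScan, altGroups]
      | cons y r =>
        obtain ⟨ts2, c2, e2⟩ := y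
        by_cases hts : ts = ts2
        · -- continue: the run goes on into the next element
          simp only [aLoop, hcurr]
          rw [if_pos hts, hts,
              ih.2 ts2 (cd + (if entry = 1 then count else if entry = 0 then -count else 0))
                tot b bt (by simp)]
        · -- run ends here: flush the pending group and update best/best_time
          simp only [aLoop, hcurr]
          rw [if_neg hts]
          rw [altGroups_flush _ _ _ (by
            rintro a bq cq r' h hc
            simp only [List.cons.injEq, Prod.mk.injEq] at h
            exact hts ((hc ▸ h.1.1).symm))]
          simp only [altScan]
          by_cases hgt : tot + (cd + (if entry = 1 then count else if entry = 0 then -count else 0)) > b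
          · rw [if_pos hgt, if_pos hgt, ih.1]
          · rw [if_neg hgt, if_neg hgt, ih.1]
    constructor
    · intro tot b bt
      have h0 := key 0 tot b bt
      simp only [add_zero, zero_add] at h0
      rw [h0]
      simp only [altGroups]
    · intro cts cd tot b bt h
      simp at h
      subst h
      have := key cd tot b bt
      rw [this]
      simp [altGroups]

-- ===== VERDICT (by name: the statement is the Claim_ definition above) =====
theorem solution_elegant_spec : Claim_equal_solution_elegant := by
  intro data _
  unfold Spec_solution_elegant solution_elegant solution_elegant_alt
  exact (main_inv data).1 0 0 0
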